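-- pv_equiv track=rewrite | github.com/ZipS1/olimp | КД НТИ 2020/ATTEMPT_1/task2.py | periodCheck
-- ===== SOURCE A (Python) =====
-- def periodCheck(n, p):
--     periodicity = True
--     n = n.ljust(len(n) // p * p + 2*p, "?")
--     syms = []
--
--     for i in range(p):
--         psyms = ''
--         for m in range(len(n) // p):
--             psyms += n[i + p*m]
--         syms.append(psyms)
--
--     for el in syms:
--         el = el.replace("?", '')
--         if el == '':
--             break
--         if el.replace(el[0], '') != '':
--             periodicity = False
--
--     if periodicity:
--         return "YES"
--     else:
--         return "NO"
-- ===== SOURCE B (Python) =====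
-- def periodCheck(n, p):
--     if p == 0:
--         raise ZeroDivisionError("integer division or modulo by zero")
--     # one linear pass: remember the first non-'?' char seen in each residue
--     # class mod p, and which classes turned out non-uniform
--     first = {}
--     bad = set()
--     for i, c in enumerate(n):
--         if c != "?":
--             r = i % p
--             if r in first:
--                 if c != first[r]:
--                     bad.add(r)
--             else:
--                 first[r] = c
--     # scan residues in order: stop at the first all-'?' class (as A does);
--     # any non-uniform class before that makes the answer NO
--     for r in range(p):
--         if r not in first:
--             break
--         if r in bad:
--             return "NO"
--     return "YES"
-- ===== Notes on version B (the rewrite author's own statement) =====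
-- stated objective: faster
-- what changed: A pads the string to a multiple of p, materialises one string per residue class by repeated quadratic concatenation and then scans them; B makes a single linear pass over the original string recording the first non-'?' character per residue class (dict) and the classes seen non-uniform (set), then scans residues 0..p-1 replicating A's break at the first all-'?' class.
import Mathlib
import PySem

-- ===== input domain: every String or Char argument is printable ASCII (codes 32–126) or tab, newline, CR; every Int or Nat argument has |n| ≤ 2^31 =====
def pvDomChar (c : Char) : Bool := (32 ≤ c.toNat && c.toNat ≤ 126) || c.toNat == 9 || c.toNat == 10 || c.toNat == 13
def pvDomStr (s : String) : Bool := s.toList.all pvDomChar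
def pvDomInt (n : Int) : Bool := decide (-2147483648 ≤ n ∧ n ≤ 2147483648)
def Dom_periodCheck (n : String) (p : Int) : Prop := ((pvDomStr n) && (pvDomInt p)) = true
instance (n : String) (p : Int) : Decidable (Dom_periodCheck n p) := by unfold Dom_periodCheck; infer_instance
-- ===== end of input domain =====

-- B replaces A's per-residue string building (quadratic concatenation over a padded copy)
-- by one linear pass over the original string; objective: faster.

-- ===== PORT A =====
-- n[i]: every index A reads is nonnegative and in range; an Array gives the same
-- value as PySem.List.pyGetD there, with O(1) access so the port evaluates
def pvIdx (a : Array Char) (i : Int) (d : Char) : Char :=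
  if h : 0 ≤ i ∧ i.toNat < a.size then a[i.toNat]'h.2 else d

-- literal transliteration of A; pvIdx's default is never used (all reads are in range)
def periodCheck (n : String) (p : Int) : String :=
  let cs0 := n.toList
  -- n = n.ljust(len(n) // p * p + 2*p, "?")
  let width : Int := PySem.Int.floordiv (cs0.length : Int) p * p + 2 * p
  let cs := cs0 ++ List.replicate (width - (cs0.length : Int)).toNat '?'
  let csA := cs.toArray
  let M := PySem.Int.floordiv (cs.length : Int) p   -- len(n) // p (len is O(1) in Python)
  -- the two nested loops building syms
  let syms := (PySem.List.pyRange 0 p 1).map (fun i =>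
    (PySem.List.pyRange 0 M 1).foldl
      (fun psyms m => psyms ++ [pvIdx csA (i + p * m) '?']) [])
  -- the for-el loop; state = (periodicity, broken)
  let st := syms.foldl (fun (st : Bool × Bool) el =>
    if st.2 then st
    else
      let el := PySem.Chars.replace el ['?'] []
      if el = [] then (st.1, true)
      else if PySem.Chars.replace el [PySem.List.pyGetD el 0 '?'] [] ≠ [] then (false, st.2)
      else st) (true, false)
  if st.1 then "YES" else "NO"

-- ===== PORT B =====
-- second loop of Source B: scan residues in order, break at the first all-'?' class
def altScan (first : PySem.Dict Int Char) (bad : PySem.Set Int) : List Int → String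
  | [] => "YES"
  | r :: rs =>
    if ¬ first.contains r then "YES"
    else if bad.contains r then "NO"
    else altScan first bad rs

-- literal transliteration of Source B (p = 0, where Source B raises ZeroDivisionError, is outside Pre_)
def periodCheck_alt (n : String) (p : Int) : String :=
  let st := (PySem.List.enumerate n.toList 0).foldl
    (fun (st : PySem.Dict Int Char × PySem.Set Int) ic =>
      if ic.2 ≠ '?' then
        let r := PySem.Int.mod ic.1 p
        match st.1.get? r with
        | some f => if ic.2 ≠ f then (st.1, PySem.Set.add st.2 r) else st
        | none => (st.1.insert r ic.2, st.2)
      else st)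
    (PySem.Dict.empty, PySem.Set.empty)
  altScan st.1 st.2 (PySem.List.pyRange 0 p 1)

-- ===== PRECONDITION & SPEC =====
-- Python A raises ZeroDivisionError when p = 0 (len(n) // p); Source B raises there too.
def Pre_periodCheck (n : String) (p : Int) : Prop := p ≠ 0
instance (n : String) (p : Int) : Decidable (Pre_periodCheck n p) := by unfold Pre_periodCheck; infer_instance
def pvWitness_periodCheck : String × Int := ("a?ab", 2)

def Spec_periodCheck (n : String) (p : Int) (out : String) : Prop := out = periodCheck_alt n p
instance (n : String) (p : Int) (out : String) : Decidable (Spec_periodCheck n p out) := by unfold Spec_periodCheck; infer_instance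

-- ===== CLAIM (what is proved, stated in full; the proofs are below) =====
def Claim_equal_periodCheck : Prop := ∀ (n : String) (p : Int), Dom_periodCheck n p → Pre_periodCheck n p → Spec_periodCheck n p (periodCheck n p)

-- ===== LEMMAS AND PROOFS =====

lemma replace_go (c : Char) : ∀ (fuel : Nat) (l acc : List Char), l.length ≤ fuel →
    PySem.Chars.replace.go [c] [] fuel l acc = acc.reverse ++ l.filter (· ≠ c) := by
  intro fuel
  induction fuel with
  | zero =>
    intro l acc h
    have : l = [] := List.eq_nil_of_length_eq_zero (Nat.le_zero.mp h)
    subst this; simp [PySem.Chars.replace.go]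
  | succ n ih =>
    intro l acc h
    cases l with
    | nil => simp [PySem.Chars.replace.go]
    | cons a t =>
      by_cases hac : c = a
      · subst hac
        simp only [PySem.Chars.replace.go, List.isPrefixOf, BEq.rfl, Bool.true_and,
          List.isPrefixOf_nil_left, if_pos, List.length_cons, List.drop_succ_cons, List.drop_zero, List.length_nil, List.reverse_nil, List.nil_append]
        rw [ih _ _ (Nat.le_of_succ_le_succ h)]
        simp
      · have hb : (c == a) = false := by simp [hac]
        simp only [PySem.Chars.replace.go, List.isPrefixOf, hb, List.isPrefixOf_nil_left,
          Bool.false_and, Bool.false_eq_true, if_false]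
        rw [ih _ _ (Nat.le_of_succ_le_succ (by simpa using h))]
        simp [List.filter_cons, Ne.symm hac]

lemma replace_single (cs : List Char) (c : Char) :
    PySem.Chars.replace cs [c] [] = cs.filter (· ≠ c) := by
  simp [PySem.Chars.replace, replace_go c cs.length cs [] le_rfl]

def colsF (p' r : Nat) : List Char → Nat → List Char
  | [], _ => []
  | c :: rest, j => (if j % p' = r ∧ c ≠ '?' then [c] else []) ++ colsF p' r rest (j + 1)

lemma colsF_append (p' r : Nat) (xs ys : List Char) : ∀ (j : Nat),
    colsF p' r (xs ++ ys) j = colsF p' r xs j ++ colsF p' r ys (j + xs.length) := by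
  induction xs with
  | nil => intro j; simp [colsF]
  | cons c t ih =>
    intro j
    simp only [List.cons_append, colsF, ih (j + 1), List.append_assoc, List.length_cons]
    ring_nf

lemma colsF_replicate (p' r k : Nat) : ∀ (j : Nat),
    colsF p' r (List.replicate k '?') j = [] := by
  induction k with
  | zero => intro j; simp [colsF]
  | succ m ih => intro j; simp [List.replicate_succ, colsF, ih]

lemma colsF_period (p' r : Nat) (cs : List Char) : ∀ (j : Nat),
    colsF p' r cs (j + p') = colsF p' r cs j := by
  induction cs with
  | nil => intro j; simp [colsF]
  | cons c t ih =>
    intro j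
    simp only [colsF, Nat.add_mod_right]
    rw [show j + p' + 1 = (j + 1) + p' by ring, ih]

lemma colsF_high (p' r : Nat) (hr : r < p') :
    ∀ (cs : List Char) (j : Nat), r < j → j ≤ p' →
      colsF p' r cs j = colsF p' r (cs.drop (p' - j)) 0 := by
  intro cs
  induction cs with
  | nil => intro j _ _; simp [colsF]
  | cons c t ih =>
    intro j hj hjp
    rcases eq_or_lt_of_le hjp with h | h
    · rw [h]
      simpa using colsF_period p' r (c :: t) 0
    · have hjm : j % p' = j := Nat.mod_eq_of_lt h
      have : ¬ (j % p' = r ∧ c ≠ '?') := by rintro ⟨h1, -⟩; omega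
      simp only [colsF, if_neg this, List.nil_append]
      rw [ih (j + 1) (by omega) (by omega),
        show p' - j = (p' - (j + 1)) + 1 from by omega, List.drop_succ_cons]

lemma colsF_chunk (p' r : Nat) (hr : r < p') (cs : List Char) :
    colsF p' r cs 0 =
      (match cs[r]? with
       | some a => if a ≠ '?' then [a] else []
       | none => []) ++ colsF p' r (cs.drop p') 0 := by
  suffices h : ∀ (cs : List Char) (j : Nat), j ≤ r →
      colsF p' r cs j =
        (match cs[r - j]? with
         | some a => if a ≠ '?' then [a] else []
         | none => []) ++ colsF p' r (cs.drop (p' - j)) 0 by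
    simpa using h cs 0 (Nat.zero_le r)
  intro cs
  induction cs with
  | nil => intro j _; simp [colsF]
  | cons c t ih =>
    intro j hj
    rcases eq_or_lt_of_le hj with h | h
    · subst h
      have hjm : j % p' = j := Nat.mod_eq_of_lt hr
      simp only [colsF, hjm, Nat.sub_self, List.getElem?_cons_zero]
      rw [colsF_high p' j hr t (j + 1) (by omega) (by omega)]
      have e : p' - j = (p' - (j + 1)) + 1 := by omega
      rw [e, List.drop_succ_cons]
      by_cases hc : c = '?'
      · subst hc; simp
      · simp [hc]
    · have hjm : j % p' = j := Nat.mod_eq_of_lt (by omega)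
      have hne : ¬ (j % p' = r ∧ c ≠ '?') := by rw [hjm]; rintro ⟨rfl, -⟩; omega
      simp only [colsF, if_neg hne, List.nil_append]
      rw [ih (j + 1) (by omega)]
      have e1 : r - j = (r - (j+1)) + 1 := by omega
      have e2 : p' - j = (p' - (j+1)) + 1 := by omega
      rw [e1, e2]
      simp

lemma A_col (p' r : Nat) (hp : 0 < p') (hr : r < p') :
    ∀ (M : Nat) (cs : List Char), cs.length ≤ p' * M →
      ((List.range M).map (fun k => cs.getD (r + p' * k) '?')).filter (· ≠ '?')
        = colsF p' r cs 0 := by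
  intro M
  induction M with
  | zero =>
    intro cs h
    have : cs = [] := List.eq_nil_of_length_eq_zero (by omega)
    subst this; simp [colsF]
  | succ m ih =>
    intro cs h
    rw [List.range_succ_eq_map]
    simp only [List.map_cons, List.map_map, List.filter_cons]
    have hmapeq : (List.range m).map ((fun k => cs.getD (r + p' * k) '?') ∘ (· + 1))
        = (List.range m).map (fun k => (cs.drop p').getD (r + p' * k) '?') := by
      apply List.map_congr_left
      intro k _
      have e : r + p' * (k + 1) = p' + (r + p' * k) := by ring
      simp [Function.comp, List.getD, List.getElem?_drop, e]
    rw [hmapeq]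
    rw [ih (cs.drop p') (by simp [List.length_drop]; omega)]
    rw [colsF_chunk p' r hr cs]
    have hgd : cs.getD (r + p' * 0) '?' = (cs[r]?).getD '?' := by
      simp [List.getD]
    rw [Nat.mul_zero, Nat.add_zero] at hgd ⊢
    cases hcs : cs[r]? with
    | none => simp [List.getD, hcs]
    | some a =>
      by_cases ha : a = '?'
      · subst ha; simp [List.getD, hcs]
      · simp [List.getD, hcs, ha]

def nonuni : List Char → Bool
  | [] => false
  | h :: t => t.any (· != h)

lemma B_fold (p : Int) (hp : 0 < p) : ∀ (cs : List Char) (j : Nat)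
    (d : PySem.Dict Int Char) (s : PySem.Set Int) (r : Nat), r < p.toNat →
    (let st := (PySem.List.enumerate cs (j : Int)).foldl
      (fun (st : PySem.Dict Int Char × PySem.Set Int) ic =>
        if ic.2 ≠ '?' then
          let r := PySem.Int.mod ic.1 p
          match st.1.get? r with
          | some f => if ic.2 ≠ f then (st.1, PySem.Set.add st.2 r) else st
          | none => (st.1.insert r ic.2, st.2)
        else st) (d, s)
    st.1.get? (r : Int) = ((d.get? (r : Int)).or (colsF p.toNat r cs j).head?) ∧
    (st.2.contains (r : Int) = true ↔
      (s.contains (r : Int) = true ∨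
        (match d.get? (r : Int) with
         | some f => (colsF p.toNat r cs j).any (· != f)
         | none => nonuni (colsF p.toNat r cs j)) = true))) := by
  have hpc : p = (p.toNat : Int) := (Int.toNat_of_nonneg hp.le).symm
  intro cs
  induction cs with
  | nil =>
    intro j d s r hr
    cases hget : d.get? ((r : Nat) : Int) <;>
      simp [PySem.List.enumerate, colsF, nonuni, hget]
  | cons c rest ih =>
    intro j d s r hr
    rw [PySem.List.enumerate_cons]
    have hj1 : ((j : Int) + 1) = ((j + 1 : Nat) : Int) := by push_cast; ring
    rw [hj1]
    simp only [List.foldl_cons]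
    have hmod : PySem.Int.mod (j : Int) p = ((j % p.toNat : Nat) : Int) := by
      rw [hpc]; exact PySem.Int.mod_natCast j p.toNat
    set r' : Nat := j % p.toNat with hr'def
    have hr'lt : r' < p.toNat := Nat.mod_lt _ (by omega)
    have hcols : colsF p.toNat r (c :: rest) j
        = (if r' = r ∧ c ≠ '?' then [c] else []) ++ colsF p.toNat r rest (j + 1) := rfl
    by_cases hc : c = '?'
    · subst hc
      rw [hcols]
      simp only [ne_eq, not_true_eq_false, Bool.false_eq_true, if_false, and_false,
        List.nil_append, reduceIte]
      exact ih (j + 1) d s r hr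
    · rw [hcols]
      simp only [ne_eq, hc, not_false_eq_true, and_true, if_true, reduceIte, hmod]
      by_cases hrr : r' = r
      · subst hrr
        rw [if_pos rfl]
        cases hget : d.get? ((r' : Nat) : Int) with
        | some f =>
          simp only [List.singleton_append]
          by_cases hcf : c = f
          · rw [if_neg (not_not_intro hcf)]
            obtain ⟨ihg, ihc⟩ := ih (j + 1) d s r' hr'lt
            rw [hget] at ihg ihc
            refine ⟨by rw [ihg]; simp, ?_⟩
            rw [ihc]
            simp [List.any_cons, hcf]
          · rw [if_pos hcf]
            obtain ⟨ihg, ihc⟩ := ih (j + 1) d (PySem.Set.add s ((r' : Nat) : Int)) r' hr'lt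
            rw [hget] at ihg ihc
            refine ⟨by rw [ihg]; simp, ?_⟩
            rw [ihc]
            have hadd : (PySem.Set.add s ((r' : Nat) : Int)).contains ((r' : Nat) : Int) = true := by
              rw [PySem.Set.contains_iff, PySem.Set.mem_add]; right; rfl
            simp [hadd, List.any_cons, bne_iff_ne, hcf]
        | none =>
          simp only [List.singleton_append]
          obtain ⟨ihg, ihc⟩ := ih (j + 1) (d.insert ((r' : Nat) : Int) c) s r' hr'lt
          rw [PySem.Dict.get?_insert, if_pos rfl] at ihg ihc
          refine ⟨by rw [ihg]; simp, ?_⟩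
          rw [ihc]
          simp [nonuni, List.any_cons]
      · have hne : ((r : Nat) : Int) ≠ ((r' : Nat) : Int) := by
          simp only [ne_eq, Int.natCast_inj]; omega
        rw [if_neg (by simp [hrr]), List.nil_append]
        cases hget : d.get? ((r' : Nat) : Int) with
        | some f =>
          simp only []
          by_cases hcf : c = f
          · rw [if_neg (not_not_intro hcf)]
            exact ih (j + 1) d s r hr
          · rw [if_pos hcf]
            obtain ⟨ihg, ihc⟩ := ih (j + 1) d (PySem.Set.add s ((r' : Nat) : Int)) r hr
            refine ⟨ihg, ?_⟩
            rw [ihc]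
            have heq : (PySem.Set.add s ((r' : Nat) : Int)).contains ((r : Nat) : Int)
                = s.contains ((r : Nat) : Int) := by
              refine Bool.eq_iff_iff.mpr ?_
              rw [PySem.Set.contains_iff, PySem.Set.mem_add, PySem.Set.contains_iff]
              constructor
              · rintro (hm | hm)
                · exact hm
                · exact absurd hm hne
              · exact Or.inl
            rw [heq]
        | none =>
          simp only []
          obtain ⟨ihg, ihc⟩ := ih (j + 1) (d.insert ((r' : Nat) : Int) c) s r hr
          rw [PySem.Dict.get?_insert, if_neg hne] at ihg ihc
          exact ⟨ihg, ihc⟩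


-- the break-loop of A over abstract per-residue tests e ("column is empty") and b ("column non-uniform")
def eStep (e b : Int → Bool) (st : Bool × Bool) (r : Int) : Bool × Bool :=
  if st.2 then st else if e r then (st.1, true) else if b r then (false, st.2) else st

lemma foldA_brk (e b : Int → Bool) : ∀ (rs : List Int) (per : Bool),
    rs.foldl (eStep e b) (per, true) = (per, true) := by
  intro rs per
  induction rs with
  | nil => rfl
  | cons r t ih => simpa [eStep] using ih

lemma foldA_fst_false (e b : Int → Bool) : ∀ (rs : List Int) (brk : Bool),
    (rs.foldl (eStep e b) (false, brk)).1 = false := by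
  intro rs
  induction rs with
  | nil => intro brk; rfl
  | cons r t ih =>
    intro brk
    by_cases hbrk : brk = true
    · subst hbrk; simpa [eStep] using ih true
    · simp only [Bool.not_eq_true] at hbrk
      subst hbrk
      by_cases he : e r = true
      · simpa [eStep, he] using ih true
      · by_cases hb : b r = true
        · simpa [eStep, he, hb] using ih false
        · simpa [eStep, he, hb] using ih false

lemma scan_eq (first : PySem.Dict Int Char) (bad : PySem.Set Int) (e b : Int → Bool) :
    ∀ (rs : List Int),
    (∀ r ∈ rs, e r = !(first.contains r)) → (∀ r ∈ rs, b r = bad.contains r) →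
    (if (rs.foldl (eStep e b) (true, false)).1 then "YES" else "NO") = altScan first bad rs := by
  intro rs
  induction rs with
  | nil => intro _ _; rfl
  | cons r t ih =>
    intro he hb
    have her := he r (List.mem_cons_self ..)
    have hbr := hb r (List.mem_cons_self ..)
    rw [List.foldl_cons, altScan]
    by_cases hc : first.contains r = true
    · have hee : e r = false := by rw [her, hc]; rfl
      by_cases hbad : bad.contains r = true
      · have hbb : b r = true := by rw [hbr, hbad]
        have hstep : eStep e b (true, false) r = (false, false) := by simp [eStep, hee, hbb]
        rw [hstep, foldA_fst_false]
        rw [if_neg (by simp), if_neg (not_not_intro hc), if_pos hbad]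
      · simp only [Bool.not_eq_true] at hbad
        have hbb : b r = false := by rw [hbr, hbad]
        have hstep : eStep e b (true, false) r = (true, false) := by simp [eStep, hee, hbb]
        rw [hstep,
          ih (fun x hx => he x (List.mem_cons_of_mem _ hx)) (fun x hx => hb x (List.mem_cons_of_mem _ hx))]
        rw [if_neg (not_not_intro hc), if_neg (show ¬(bad.contains r = true) from fun hbt => by rw [hbt] at hbad; cases hbad)]
    · simp only [Bool.not_eq_true] at hc
      have hee : e r = true := by rw [her, hc]; rfl
      have hstep : eStep e b (true, false) r = (true, true) := by simp [eStep, hee]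
      rw [hstep, foldA_brk]
      rw [if_pos (by simp), if_pos (by simp [hc])]

-- pvIdx on the array of a list is List.getD at the (nonnegative) index
lemma pvIdx_toArray (l : List Char) (i : Int) (d : Char) (hi : 0 ≤ i) :
    pvIdx l.toArray i d = l.getD i.toNat d := by
  unfold pvIdx
  by_cases h : i.toNat < l.length
  · rw [dif_pos ⟨hi, by simpa using h⟩]
    simp [List.getD, List.getElem?_eq_getElem h]
  · rw [dif_neg (fun hcon => h (by simpa using hcon.2))]
    rw [List.getD, List.getElem?_eq_none (by omega), Option.getD_none]

-- A-side column: the inner loop's string, '?'-stripped, is colsF of the original list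
lemma A_body (p : Int) (hpos : 0 < p) (cs0 : List Char) (q : Nat)
    (hlen : cs0.length ≤ q * p.toNat + 2 * p.toNat)
    (r : Int) (hr : 0 ≤ r) (hrp : r < p) :
    ((PySem.List.pyRange 0 ((q + 2 : Nat) : Int) 1).map
        (fun m => pvIdx (cs0 ++ List.replicate (q * p.toNat + 2 * p.toNat - cs0.length) '?').toArray (r + p * m) '?')).filter (· ≠ '?')
      = colsF p.toNat r.toNat cs0 0 := by
  set p' := p.toNat with hp'
  have hp'pos : 0 < p' := by omega
  have hpp : p = (p' : Int) := (Int.toNat_of_nonneg hpos.le).symm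
  have hrr : r = ((r.toNat : Nat) : Int) := (Int.toNat_of_nonneg hr).symm
  set cs := cs0 ++ List.replicate (q * p' + 2 * p' - cs0.length) '?' with hcs
  have hlen2 : cs.length = p' * (q + 2) := by
    rw [hcs]; simp only [List.length_append, List.length_replicate]
    have hring : p' * (q + 2) = q * p' + 2 * p' := by ring
    omega
  rw [PySem.List.pyRange_one]
  simp only [sub_zero, Int.toNat_natCast, List.map_map]
  have hmap : (List.range (q + 2)).map
        ((fun m => pvIdx cs.toArray (r + p * m) '?') ∘ (fun k : Nat => 0 + (k : Int)))
      = (List.range (q + 2)).map (fun k => cs.getD (r.toNat + p' * k) '?') := by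
    apply List.map_congr_left
    intro k _
    simp only [Function.comp, zero_add]
    rw [pvIdx_toArray cs _ '?' (by positivity)]
    congr 1
    rw [hpp, hrr]
    norm_cast
  rw [hmap, A_col p' r.toNat hp'pos (by omega) (q + 2) cs (le_of_eq hlen2)]
  rw [hcs, colsF_append, colsF_replicate, List.append_nil]

-- ===== VERDICT (by name: the statement is the Claim_ definition above) =====
theorem periodCheck_spec : Claim_equal_periodCheck := by
  intro n p _hDom hPre
  unfold Spec_periodCheck
  rcases lt_trichotomy p 0 with hneg | hz | hpos
  · -- p < 0 : no residues at all, both answer "YES"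
    unfold periodCheck periodCheck_alt
    rw [PySem.List.pyRange_one_eq_nil (le_of_lt hneg)]
    simp [altScan]
  · exact absurd hz hPre
  · -- p > 0
    set p' := p.toNat with hp'
    have hp'pos : 0 < p' := by omega
    have hpp : p = (p' : Int) := (Int.toNat_of_nonneg hpos.le).symm
    set cs0 := n.toList with hcs0
    set q : Nat := cs0.length / p' with hq
    have hdm : p' * q + cs0.length % p' = cs0.length := by
      rw [hq]; exact Nat.div_add_mod _ _
    have hmlt : cs0.length % p' < p' := Nat.mod_lt _ hp'pos
    have hc1 : q * p' = p' * q := Nat.mul_comm q p'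
    have hlen : cs0.length ≤ q * p' + 2 * p' := by omega
    -- the column function both sides are reduced to
    set col : Int → List Char := fun r => colsF p' r.toNat cs0 0 with hcol
    set e : Int → Bool := fun r => decide (col r = []) with he_def
    set b : Int → Bool := fun r => nonuni (col r) with hb_def
    -- ===== A side =====
    have hwidth : (PySem.Int.floordiv ((cs0.length : Nat) : Int) p * p + 2 * p
        - ((cs0.length : Nat) : Int)).toNat = q * p' + 2 * p' - cs0.length := by
      rw [hpp, PySem.Int.floordiv_natCast, ← hq]
      rw [show ((q : Int) * (p' : Int) + 2 * (p' : Int) - ((cs0.length : Nat) : Int))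
          = (((q * p' + 2 * p' : Nat) : Int) - ((cs0.length : Nat) : Int)) from by push_cast; ring]
      omega
    have hA : periodCheck n p =
        (if ((PySem.List.pyRange 0 p 1).foldl (eStep e b) (true, false)).1
         then "YES" else "NO") := by
      unfold periodCheck
      simp only [← hcs0]
      rw [hwidth]
      have hlen2 : (cs0 ++ List.replicate (q * p' + 2 * p' - cs0.length) '?').length
          = p' * (q + 2) := by
        simp only [List.length_append, List.length_replicate]
        have hring : p' * (q + 2) = q * p' + 2 * p' := by ring
        omega
      have hM : PySem.Int.floordiv
          (((cs0 ++ List.replicate (q * p' + 2 * p' - cs0.length) '?').length : Nat) : Int) p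
          = ((q + 2 : Nat) : Int) := by
        rw [hlen2, hpp, PySem.Int.floordiv_natCast, Nat.mul_div_cancel_left _ hp'pos]
      rw [hM]
      -- inner loop → map
      have hinner : ∀ i : Int,
          (PySem.List.pyRange 0 ((q + 2 : Nat) : Int) 1).foldl
            (fun psyms m => psyms ++ [pvIdx
              (cs0 ++ List.replicate (q * p' + 2 * p' - cs0.length) '?').toArray (i + p * m) '?']) []
          = (PySem.List.pyRange 0 ((q + 2 : Nat) : Int) 1).map
            (fun m => pvIdx
              (cs0 ++ List.replicate (q * p' + 2 * p' - cs0.length) '?').toArray (i + p * m) '?') := by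
        intro i
        rw [PySem.List.foldl_append_singleton_eq_map]
        rfl
      simp only [hinner]
      rw [List.foldl_map]
      refine congrArg (fun z : Bool × Bool => if z.1 then "YES" else "NO") ?_
      apply PySem.List.foldl_congr_mem
      intro st r hrmem
      obtain ⟨hr0, hrp⟩ := (PySem.List.mem_pyRange_one).mp hrmem
      have hcolr := A_body p hpos cs0 q hlen r hr0 hrp
      by_cases hbrk : st.2 = true
      · simp [eStep, hbrk]
      · simp only [Bool.not_eq_true] at hbrk
        simp only [eStep, hbrk, Bool.false_eq_true, if_false, reduceIte]
        rw [replace_single, hcolr,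
          show colsF p.toNat r.toNat cs0 0 = col r from rfl]
        cases hcc : col r with
        | nil =>
          rw [if_pos rfl]
          have : e r = true := by rw [he_def]; simp [hcc]
          rw [this, if_pos rfl]
        | cons h t =>
          rw [if_neg (List.cons_ne_nil h t)]
          have hee : e r = false := by rw [he_def]; simp [hcc]
          rw [hee]
          have hflt : PySem.Chars.replace (h :: t) [PySem.List.pyGetD (h :: t) 0 '?'] []
              = t.filter (· ≠ h) := by
            rw [PySem.List.pyGetD_zero_cons, replace_single, List.filter_cons]
            simp
          by_cases hany : t.any (· != h) = true
          · have hbb : b r = true := by rw [hb_def]; simp [hcc, nonuni, hany]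
            rw [hbb]
            have : PySem.Chars.replace (h :: t) [PySem.List.pyGetD (h :: t) 0 '?'] [] ≠ [] := by
              rw [hflt]
              obtain ⟨x, hx, hxh⟩ := List.any_eq_true.mp hany
              intro hnil
              have := List.filter_eq_nil_iff.mp hnil x hx
              simp only [bne_iff_ne, ne_eq] at hxh
              simp [hxh] at this
            rw [if_pos this]
            simp
          · simp only [Bool.not_eq_true] at hany
            have hbb : b r = false := by rw [hb_def]; simp [hcc, nonuni, hany]
            rw [hbb]
            have : ¬ (PySem.Chars.replace (h :: t) [PySem.List.pyGetD (h :: t) 0 '?'] [] ≠ []) := by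
              rw [hflt]
              simp only [ne_eq, not_not]
              rw [List.filter_eq_nil_iff]
              intro a ha
              have := List.any_eq_false.mp hany a ha
              simp only [bne_iff_ne, ne_eq, Bool.not_eq_true] at this ⊢
              simpa using this
            rw [if_neg this]
            simp
    rw [hA]
    unfold periodCheck_alt
    refine scan_eq _ _ e b (PySem.List.pyRange 0 p 1) ?_ ?_
    · -- e r = !(first.contains r)
      intro r hrmem
      obtain ⟨hr0, hrp⟩ := (PySem.List.mem_pyRange_one).mp hrmem
      have hrt : r = ((r.toNat : Nat) : Int) := (Int.toNat_of_nonneg hr0).symm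
      obtain ⟨hg, -⟩ := B_fold p hpos n.toList 0 PySem.Dict.empty PySem.Set.empty r.toNat
        (by omega)
      rw [PySem.Dict.get?_empty, Option.none_or, Nat.cast_zero, ← hcs0] at hg
      rw [hrt, PySem.Dict.contains_eq_isSome_get?, hg]
      simp only [he_def, hcol, Int.toNat_natCast, hp']
      have hgen : ∀ x : List Char, decide (x = []) = !x.head?.isSome := by
        intro x; cases x <;> simp
      exact hgen _
    · -- b r = bad.contains r
      intro r hrmem
      obtain ⟨hr0, hrp⟩ := (PySem.List.mem_pyRange_one).mp hrmem
      have hrt : r = ((r.toNat : Nat) : Int) := (Int.toNat_of_nonneg hr0).symm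
      obtain ⟨-, hcnt⟩ := B_fold p hpos n.toList 0 PySem.Dict.empty PySem.Set.empty r.toNat
        (by omega)
      rw [Nat.cast_zero, ← hcs0] at hcnt
      simp only [PySem.Dict.get?_empty] at hcnt
      refine Bool.eq_iff_iff.mpr ?_
      rw [hrt, hcnt]
      simp only [hb_def, hcol, Int.toNat_natCast, hp']
      simp [PySem.Set.empty]
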